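-- pv_equiv track=rewrite | github.com/Noble-Collective/Affinity-to-Markdown | afpub_to_markdown.py | _join_linked_frames
-- ===== SOURCE A (Python) =====
-- def _join_linked_frames(
--     blocks: list[tuple[int, str, list, list]],
-- ) -> list[tuple[int, str, list, list]]:
--     if len(blocks) < 2:
--         return blocks
--
--     joined: list[tuple[int, str, list, list]] = []
--     i = 0
--     while i < len(blocks):
--         offset, text, runs, para_runs = blocks[i]
--
--         while i + 1 < len(blocks):
--             cur_stripped = text.rstrip('\x00').rstrip()
--             if len(cur_stripped) < 20 or not cur_stripped[-1].isalpha():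
--                 break
--             next_offset, next_text, next_runs, next_para_runs = blocks[i + 1]
--             next_clean = next_text.lstrip('\x00').lstrip()
--             if not next_clean or not next_clean[0].islower():
--                 break
--
--             cur_for_join = text.rstrip('\x00')
--             base_len = len(cur_for_join)
--             text = cur_for_join + next_text
--
--             if next_runs:
--                 offset_runs = [(ce + base_len, sid) for ce, sid in next_runs]
--                 runs = runs + offset_runs
--             if next_para_runs:
--                 offset_para = [(ce + base_len, sid) for ce, sid in next_para_runs]
--                 para_runs = para_runs + offset_para
--
--             i += 1
--
--         joined.append((offset, text, runs, para_runs))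
--         i += 1
--
--     return joined
-- ===== SOURCE B (Python) =====
-- def _join_linked_frames(
--     blocks: list[tuple[int, str, list, list]],
-- ) -> list[tuple[int, str, list, list]]:
--     # Backward pass: walk the blocks right-to-left, keeping a stack of finished
--     # chunks; the current block repeatedly absorbs the top chunk while the join
--     # guard holds, then is pushed itself.
--     def can_join(text, next_text):
--         cur = text.rstrip('\x00').rstrip()
--         if len(cur) < 20 or not cur[-1:].isalpha():
--             return False
--         nxt = next_text.lstrip('\x00').lstrip()
--         return nxt[:1].islower()
--
--     def merge(left, right):
--         offset, text, runs, para_runs = left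
--         _, next_text, next_runs, next_para_runs = right
--         cur = text.rstrip('\x00')
--         base = len(cur)
--         return (
--             offset,
--             cur + next_text,
--             runs + [(ce + base, sid) for ce, sid in next_runs],
--             para_runs + [(ce + base, sid) for ce, sid in next_para_runs],
--         )
--
--     # stack of finished chunks, most recent (leftmost in the result) on top
--     stack: list[tuple[int, str, list, list]] = []
--     for block in reversed(blocks):
--         while stack and can_join(block[1], stack[-1][1]):
--             block = merge(block, stack.pop())
--         stack.append(block)
--     stack.reverse()
--     return stack
-- ===== Notes on version B (the rewrite author's own statement) =====
-- stated objective: alternative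
-- what changed: A scans forward with an index and a nested while that mutates an accumulated block; B makes one backward pass keeping a stack of finished chunks and lets each block repeatedly absorb the whole top chunk, which needs a proof that the join guard on a merged chunk equals the guard on its first block.
import Mathlib
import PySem

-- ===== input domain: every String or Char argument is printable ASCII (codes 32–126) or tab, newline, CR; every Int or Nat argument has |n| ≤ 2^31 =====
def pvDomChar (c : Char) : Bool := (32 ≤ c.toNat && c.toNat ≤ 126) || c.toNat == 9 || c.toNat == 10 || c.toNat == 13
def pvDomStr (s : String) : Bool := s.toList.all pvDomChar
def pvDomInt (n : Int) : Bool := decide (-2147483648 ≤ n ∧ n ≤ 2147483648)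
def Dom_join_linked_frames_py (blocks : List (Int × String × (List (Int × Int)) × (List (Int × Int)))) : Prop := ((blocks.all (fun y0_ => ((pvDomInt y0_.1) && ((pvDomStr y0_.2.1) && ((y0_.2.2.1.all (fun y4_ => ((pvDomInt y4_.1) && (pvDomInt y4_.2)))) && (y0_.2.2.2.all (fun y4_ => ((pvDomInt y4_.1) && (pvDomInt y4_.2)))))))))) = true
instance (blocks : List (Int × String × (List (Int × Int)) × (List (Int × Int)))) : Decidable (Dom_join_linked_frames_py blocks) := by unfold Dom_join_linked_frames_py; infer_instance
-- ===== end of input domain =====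

-- B replaces A's forward index scan with a nested accumulating while by one backward pass
-- over the blocks that keeps a stack of finished chunks (objective: alternative, same cost).

-- ===== PORT A =====
-- shared textual primitives, mirroring the Python string methods both sources call:
-- pvR0 = s.rstrip('\x00'), pvL0 = s.lstrip('\x00') (exact: single strip character),
-- pvShift = [(ce + base_len, sid) for ce, sid in l]
def pvR0 (cs : List Char) : List Char := (cs.reverse.dropWhile (fun c => c == '\x00')).reverse

def pvL0 (cs : List Char) : List Char := cs.dropWhile (fun c => c == '\x00')

def pvShift (n : Int) (l : List (Int × Int)) : List (Int × Int) := l.map (fun p => (p.1 + n, p.2))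

-- the outer while of A: current accumulated block (offset, text, runs, paraRuns) + the blocks left
def aGo (offset : Int) (text : List Char) (runs paraRuns : List (Int × Int)) :
    List (Int × String × (List (Int × Int)) × (List (Int × Int))) →
    List (Int × String × (List (Int × Int)) × (List (Int × Int)))
  | [] => [(offset, String.ofList text, runs, paraRuns)]
  | (noff, ntext, nruns, npara) :: rest' =>
    let cur_stripped := PySem.Chars.rstrip (pvR0 text)
    if cur_stripped.length < 20 || !((PySem.List.pyGet? cur_stripped (-1)).elim false PySem.Chars.isalpha) then
      (offset, String.ofList text, runs, paraRuns) :: aGo noff ntext.toList nruns npara rest'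
    else
      let next_clean := PySem.Chars.lstrip (pvL0 ntext.toList)
      if next_clean.isEmpty || !((PySem.List.pyGet? next_clean 0).elim false PySem.Chars.islower) then
        (offset, String.ofList text, runs, paraRuns) :: aGo noff ntext.toList nruns npara rest'
      else
        let cur_for_join := pvR0 text
        let base_len : Int := (cur_for_join.length : Int)
        let text' := cur_for_join ++ ntext.toList
        let runs' := if nruns ≠ [] then runs ++ pvShift base_len nruns else runs
        let para' := if npara ≠ [] then paraRuns ++ pvShift base_len npara else paraRuns
        aGo offset text' runs' para' rest'

def join_linked_frames_py (blocks : List (Int × String × (List (Int × Int)) × (List (Int × Int)))) : List (Int × String × (List (Int × Int)) × (List (Int × Int))) :=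
  if blocks.length < 2 then blocks
  else
    match blocks with
    | [] => []
    | (o, t, r, p) :: rest => aGo o t.toList r p rest

-- ===== PORT B =====
-- can_join(text, next_text) of Source B
def bGuard (t nt : List Char) : Bool :=
  let cur := PySem.Chars.rstrip (pvR0 t)
  if cur.length < 20 || !(cur.getLast?.elim false PySem.Chars.isalpha) then false
  else
    let nxt := PySem.Chars.lstrip (pvL0 nt)
    nxt.head?.elim false PySem.Chars.islower

-- merge(left, right) of Source B
def bMerge (b c : Int × String × (List (Int × Int)) × (List (Int × Int))) :
    Int × String × (List (Int × Int)) × (List (Int × Int)) :=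
  let cur := pvR0 b.2.1.toList
  let base : Int := (cur.length : Int)
  (b.1, String.ofList (cur ++ c.2.1.toList), b.2.2.1 ++ pvShift base c.2.2.1,
    b.2.2.2 ++ pvShift base c.2.2.2)

-- one step of B's backward pass: the current block absorbs top chunks while the guard holds
def bStep (b : Int × String × (List (Int × Int)) × (List (Int × Int))) :
    List (Int × String × (List (Int × Int)) × (List (Int × Int))) →
    List (Int × String × (List (Int × Int)) × (List (Int × Int)))
  | [] => [b]
  | c :: out' => if bGuard b.2.1.toList c.2.1.toList then bStep (bMerge b c) out' else b :: c :: out'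

def join_linked_frames_py_alt (blocks : List (Int × String × (List (Int × Int)) × (List (Int × Int)))) : List (Int × String × (List (Int × Int)) × (List (Int × Int))) :=
  blocks.foldr bStep []

-- ===== PRECONDITION & SPEC =====
def Spec_join_linked_frames_py (blocks : List (Int × String × (List (Int × Int)) × (List (Int × Int)))) (out : List (Int × String × (List (Int × Int)) × (List (Int × Int)))) : Prop := out = join_linked_frames_py_alt blocks
instance (blocks : List (Int × String × (List (Int × Int)) × (List (Int × Int)))) (out : List (Int × String × (List (Int × Int)) × (List (Int × Int)))) : Decidable (Spec_join_linked_frames_py blocks out) := by unfold Spec_join_linked_frames_py; infer_instance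

-- ===== CLAIM (what is proved, stated in full; the proofs are below) =====
def Claim_equal_join_linked_frames_py : Prop := ∀ (blocks : List (Int × String × (List (Int × Int)) × (List (Int × Int)))), Dom_join_linked_frames_py blocks → Spec_join_linked_frames_py blocks (join_linked_frames_py blocks)

-- ===== LEMMAS AND PROOFS =====

theorem dropWhile_append_left {p : Char → Bool} {x : List Char} (y : List Char)
    (h : x.dropWhile p ≠ []) : (x ++ y).dropWhile p = x.dropWhile p ++ y := by
  rw [List.dropWhile_append]; simp [List.isEmpty_iff, h]

theorem mem_dropWhile {p : Char → Bool} {c : Char} {x : List Char}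
    (hc : c ∈ x) (hp : p c = false) : c ∈ x.dropWhile p := by
  induction x with
  | nil => simp at hc
  | cons a x ih =>
    by_cases hpa : p a
    · rw [List.dropWhile_cons_of_pos hpa]
      rcases List.mem_cons.mp hc with rfl | hmem
      · rw [hpa] at hp; cases hp
      · exact ih hmem
    · rw [List.dropWhile_cons_of_neg hpa]; exact hc

theorem alpha_facts (c : Char) (h : PySem.Chars.isalpha c = true) :
    (c == '\x00') = false ∧ PySem.Chars.isspace c = false := by
  simp only [PySem.Chars.isalpha, PySem.Chars.isupper, PySem.Chars.islower, Bool.or_eq_true,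
    Bool.and_eq_true, decide_eq_true_eq, Char.le_def] at h
  have h2 : 65 ≤ c.toNat ∧ c.toNat ≤ 90 ∨ 97 ≤ c.toNat ∧ c.toNat ≤ 122 := by
    rcases h with ⟨h1, h2⟩ | ⟨h1, h2⟩
    · left; exact ⟨h1, h2⟩
    · right; exact ⟨h1, h2⟩
  constructor
  · simp only [beq_eq_false_iff_ne, ne_eq]
    intro he; subst he; simp at h2
  · unfold PySem.Chars.isspace
    simp only [Bool.or_eq_false_iff, Bool.and_eq_false_iff, decide_eq_false_iff_not]
    omega

-- from pvLeftOK t : the stripped text is long and ends in a letter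

-- left half of the join guard, on the accumulated text
def pvLeftOK (t : List Char) : Bool :=
  let cur := PySem.Chars.rstrip (pvR0 t)
  !(cur.length < 20 || !(cur.getLast?.elim false PySem.Chars.isalpha))

theorem leftOK_facts {t : List Char} (h : pvLeftOK t = true) :
    20 ≤ (PySem.Chars.rstrip (pvR0 t)).length ∧
    ∃ c, (PySem.Chars.rstrip (pvR0 t)).getLast? = some c ∧ PySem.Chars.isalpha c = true := by
  unfold pvLeftOK at h
  simp only [Bool.not_eq_eq_eq_not, Bool.not_true] at h
  rw [Bool.or_eq_false_iff] at h
  obtain ⟨h1, h2⟩ := h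
  refine ⟨by simpa using h1, ?_⟩
  rw [Bool.not_eq_false'] at h2
  cases hg : (PySem.Chars.rstrip (pvR0 t)).getLast? with
  | none => rw [hg] at h2; simp [Option.elim] at h2
  | some c => exact ⟨c, rfl, by rw [hg] at h2; simpa using h2⟩

-- rstrip y ⊆ y and pvR0 y ⊆ y (as membership)

theorem mem_of_mem_rstrip {c : Char} {y : List Char}
    (h : c ∈ PySem.Chars.rstrip y) : c ∈ y := by
  unfold PySem.Chars.rstrip at h
  rw [List.mem_reverse] at h
  have := (List.dropWhile_sublist (l := y.reverse) (p := PySem.Chars.isspace)).mem h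
  simpa using this

-- a letter inside x survives lstrip('\x00').lstrip()

theorem lstrip_ne_nil_of_alpha {x : List Char} {c : Char}
    (hc : c ∈ x) (ha : PySem.Chars.isalpha c = true) :
    PySem.Chars.lstrip (pvL0 x) ≠ [] := by
  obtain ⟨h0, hs⟩ := alpha_facts c ha
  have h1 : c ∈ pvL0 x := mem_dropWhile hc h0
  have h2 : c ∈ PySem.Chars.lstrip (pvL0 x) := mem_dropWhile h1 hs
  exact List.ne_nil_of_mem h2

-- x = pvR0 x ++ (trailing NULs)

theorem pvR0_decomp (x : List Char) :
    x = pvR0 x ++ (x.reverse.takeWhile (fun c => c == '\x00')).reverse := by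
  unfold pvR0
  rw [← List.reverse_append, List.takeWhile_append_dropWhile, List.reverse_reverse]

theorem pvR0_append_left {x : List Char} (y : List Char)
    (h : pvR0 x ≠ []) : pvR0 (y ++ x) = y ++ pvR0 x := by
  unfold pvR0 at *
  rw [List.reverse_append, List.dropWhile_append]
  have h2 : ¬ (x.reverse.dropWhile (fun c => c == '\x00')).isEmpty = true := by
    simp only [List.isEmpty_iff]
    intro he
    exact h (by simp [he])
  rw [if_neg h2, List.reverse_append, List.reverse_reverse]

theorem rstrip_append_left {x : List Char} (y : List Char)
    (h : PySem.Chars.rstrip x ≠ []) :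
    PySem.Chars.rstrip (y ++ x) = y ++ PySem.Chars.rstrip x := by
  unfold PySem.Chars.rstrip at *
  rw [List.reverse_append, List.dropWhile_append]
  have h2 : ¬ (x.reverse.dropWhile PySem.Chars.isspace).isEmpty = true := by
    simp only [List.isEmpty_iff]
    intro he
    exact h (by simp [he])
  rw [if_neg h2, List.reverse_append, List.reverse_reverse]

theorem pvR0_ne_nil_of_leftOK {t : List Char} (h : pvLeftOK t = true) : pvR0 t ≠ [] := by
  obtain ⟨hlen, c, hc, _⟩ := leftOK_facts h
  intro he
  rw [he] at hlen
  simp [PySem.Chars.rstrip] at hlen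

theorem rstrip_pvR0_ne_nil_of_leftOK {t : List Char} (h : pvLeftOK t = true) :
    PySem.Chars.rstrip (pvR0 t) ≠ [] := by
  obtain ⟨hlen, _⟩ := leftOK_facts h
  intro he; rw [he] at hlen; simp at hlen

theorem pvR0_pvR0_append {t nt : List Char} (h : pvR0 nt ≠ []) :
    pvR0 (pvR0 t ++ nt) = pvR0 t ++ pvR0 nt :=
  pvR0_append_left (pvR0 t) h

-- clean-first of a merged text = clean-first of the left text

theorem cf_merge {t : List Char} (nt : List Char) (h : pvLeftOK t = true) :
    (PySem.Chars.lstrip (pvL0 (pvR0 t ++ nt))).head? = (PySem.Chars.lstrip (pvL0 t)).head? := by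
  obtain ⟨_, c, hc, ha⟩ := leftOK_facts h
  have hcr : c ∈ PySem.Chars.rstrip (pvR0 t) := List.mem_of_getLast? hc
  have hcm : c ∈ pvR0 t := mem_of_mem_rstrip hcr
  obtain ⟨h0, hs⟩ := alpha_facts c ha
  have hL0 : pvL0 (pvR0 t) ≠ [] := List.ne_nil_of_mem (mem_dropWhile hcm h0)
  have hLs : PySem.Chars.lstrip (pvL0 (pvR0 t)) ≠ [] := lstrip_ne_nil_of_alpha hcm ha
  have key : ∀ z : List Char,
      (PySem.Chars.lstrip (pvL0 (pvR0 t ++ z))).head? = (PySem.Chars.lstrip (pvL0 (pvR0 t))).head? := by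
    intro z
    unfold pvL0 PySem.Chars.lstrip at *
    rw [dropWhile_append_left z hL0, dropWhile_append_left z hLs]
    exact List.head?_append_of_ne_nil _ hLs
  rw [key nt]
  have hdec := pvR0_decomp t
  calc (PySem.Chars.lstrip (pvL0 (pvR0 t))).head?
      = (PySem.Chars.lstrip (pvL0 (pvR0 t ++ (t.reverse.takeWhile (fun c => c == '\x00')).reverse))).head? := (key _).symm
    _ = (PySem.Chars.lstrip (pvL0 t)).head? := by rw [← hdec]

-- pvLeftOK of a merged text, and its stripped form

theorem leftOK_merge {nt : List Char} (t : List Char) (h : pvLeftOK nt = true) :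
    pvLeftOK (pvR0 t ++ nt) = true ∧
    PySem.Chars.rstrip (pvR0 (pvR0 t ++ nt)) = pvR0 t ++ PySem.Chars.rstrip (pvR0 nt) := by
  obtain ⟨hlen, c, hc, ha⟩ := leftOK_facts h
  have hr : PySem.Chars.rstrip (pvR0 nt) ≠ [] := rstrip_pvR0_ne_nil_of_leftOK h
  have hn : pvR0 nt ≠ [] := pvR0_ne_nil_of_leftOK h
  have heq : PySem.Chars.rstrip (pvR0 (pvR0 t ++ nt)) = pvR0 t ++ PySem.Chars.rstrip (pvR0 nt) := by
    rw [pvR0_pvR0_append hn, rstrip_append_left _ hr]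
  refine ⟨?_, heq⟩
  unfold pvLeftOK
  rw [heq]
  simp only [List.length_append, List.getLast?_append]
  rw [hc]
  have hor : (some c).or (pvR0 t).getLast? = some c := rfl
  rw [hor]
  simp only [Option.elim_some, ha, Bool.not_true, Bool.or_false]
  simp only [Bool.not_eq_true', decide_eq_false_iff_not, not_lt]
  omega

theorem bGuard_eq (t nt : List Char) :
    bGuard t nt = (pvLeftOK t && (PySem.Chars.lstrip (pvL0 nt)).head?.elim false PySem.Chars.islower) := by
  unfold bGuard pvLeftOK
  by_cases h : (PySem.Chars.rstrip (pvR0 t)).length < 20 ||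
      !((PySem.Chars.rstrip (pvR0 t)).getLast?.elim false PySem.Chars.isalpha)
  · simp [h]
  · simp only [Bool.not_eq_true] at h
    simp [h]

theorem pvShift_shift (a b : Int) (l : List (Int × Int)) :
    pvShift a (pvShift b l) = pvShift (a + b) l := by
  simp only [pvShift, List.map_map]
  apply List.map_congr_left
  intro p _
  simp [Function.comp]
  ring

theorem pvShift_append (n : Int) (l l' : List (Int × Int)) :
    pvShift n (l ++ l') = pvShift n l ++ pvShift n l' := by
  simp [pvShift]

theorem bMerge_assoc {b n c : Int × String × (List (Int × Int)) × (List (Int × Int))}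
    (h : pvR0 n.2.1.toList ≠ []) :
    bMerge (bMerge b n) c = bMerge b (bMerge n c) := by
  obtain ⟨bo, bt, br, bp⟩ := b
  obtain ⟨no, nt, nr, np⟩ := n
  obtain ⟨co, ct, cr, cp⟩ := c
  simp only [bMerge, String.toList_ofList] at *
  rw [pvR0_pvR0_append h]
  refine Prod.ext rfl (Prod.ext ?_ (Prod.ext ?_ ?_)) <;>
    simp only [List.append_assoc, List.length_append, pvShift_append, pvShift_shift]
  · rfl
  all_goals
    push_cast
    rfl

-- "clean first character" of a text: first char after lstrip('\x00').lstrip()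
def pvCF (s : String) : Option Char := (PySem.Chars.lstrip (pvL0 s.toList)).head?

theorem pvCF_bMerge (n c : Int × String × (List (Int × Int)) × (List (Int × Int)))
    (h : pvLeftOK n.2.1.toList = true) : pvCF (bMerge n c).2.1 = pvCF n.2.1 := by
  unfold pvCF bMerge
  simp only [String.toList_ofList]
  exact cf_merge c.2.1.toList h

theorem bStep_head (out : List (Int × String × (List (Int × Int)) × (List (Int × Int)))) :
    ∀ n, ∃ h tl, bStep n out = h :: tl ∧ pvCF h.2.1 = pvCF n.2.1 := by
  induction out with
  | nil => exact fun n => ⟨n, [], rfl, rfl⟩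
  | cons c out' ih =>
    intro n
    by_cases hg : bGuard n.2.1.toList c.2.1.toList = true
    · obtain ⟨h, tl, heq, hcf⟩ := ih (bMerge n c)
      have hL : pvLeftOK n.2.1.toList = true := by
        rw [bGuard_eq] at hg; exact (Bool.and_eq_true_iff.mp hg).1
      exact ⟨h, tl, by simp only [bStep, if_pos hg]; exact heq,
        hcf.trans (pvCF_bMerge n c hL)⟩
    · exact ⟨n, c :: out', by simp only [bStep, if_neg hg], rfl⟩

theorem bStep_bStep (out : List (Int × String × (List (Int × Int)) × (List (Int × Int)))) :
    ∀ b n, bGuard b.2.1.toList n.2.1.toList = true →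
    bStep b (bStep n out) = bStep (bMerge b n) out := by
  induction out with
  | nil =>
    intro b n hg
    simp only [bStep, if_pos hg]
  | cons c out' ih =>
    intro b n hg
    by_cases h2 : bGuard n.2.1.toList c.2.1.toList = true
    · have hLn : pvLeftOK n.2.1.toList = true := by
        rw [bGuard_eq] at h2; exact (Bool.and_eq_true_iff.mp h2).1
      have hRc := (Bool.and_eq_true_iff.mp ((bGuard_eq _ _) ▸ h2)).2
      have hLb : pvLeftOK b.2.1.toList = true := by
        rw [bGuard_eq] at hg; exact (Bool.and_eq_true_iff.mp hg).1
      have hRn := (Bool.and_eq_true_iff.mp ((bGuard_eq _ _) ▸ hg)).2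
      have hα : bGuard b.2.1.toList (bMerge n c).2.1.toList = true := by
        rw [bGuard_eq, hLb, Bool.true_and]
        have : (PySem.Chars.lstrip (pvL0 (bMerge n c).2.1.toList)).head? =
            (PySem.Chars.lstrip (pvL0 n.2.1.toList)).head? := pvCF_bMerge n c hLn
        rw [this]
        exact hRn
      have hβ : bGuard (bMerge b n).2.1.toList c.2.1.toList = true := by
        rw [bGuard_eq]
        have hm := (leftOK_merge (nt := n.2.1.toList) b.2.1.toList hLn).1
        have : (bMerge b n).2.1.toList = pvR0 b.2.1.toList ++ n.2.1.toList := by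
          simp [bMerge]
        rw [this, hm, Bool.true_and]
        exact hRc
      have hnil : pvR0 n.2.1.toList ≠ [] := pvR0_ne_nil_of_leftOK hLn
      calc bStep b (bStep n (c :: out'))
          = bStep b (bStep (bMerge n c) out') := by simp only [bStep, if_pos h2]
        _ = bStep (bMerge b (bMerge n c)) out' := ih b (bMerge n c) hα
        _ = bStep (bMerge (bMerge b n) c) out' := by rw [bMerge_assoc hnil]
        _ = bStep (bMerge b n) (c :: out') := by simp only [bStep, if_pos hβ]
    · simp only [bStep, if_neg h2, if_pos hg]

theorem pyGet_neg_one_eq_getLast? (l : List Char) :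
    PySem.List.pyGet? l (-1) = l.getLast? := by
  simp [PySem.List.pyGet?, PySem.List.pyIdx?]
  rcases l with _ | ⟨a, l⟩
  · simp
  · have h : (a :: l).length - 1 = l.length := by simp
    rw [h]
    simp [List.getLast?_eq_getElem?]

theorem pyGet_zero_eq_head? (l : List Char) :
    PySem.List.pyGet? l 0 = l.head? := by
  rcases l with _ | ⟨a, l⟩ <;> simp [PySem.List.pyGet?, PySem.List.pyIdx?]

-- A's first break condition is the negation of pvLeftOK

theorem aCond1_eq (t : List Char) :
    (decide ((PySem.Chars.rstrip (pvR0 t)).length < 20) ||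
      !((PySem.List.pyGet? (PySem.Chars.rstrip (pvR0 t)) (-1)).elim false PySem.Chars.isalpha)) =
    !(pvLeftOK t) := by
  unfold pvLeftOK
  rw [pyGet_neg_one_eq_getLast?, Bool.not_not]

-- A's second break condition is the negation of the guard's right half

theorem aCond2_eq (nt : List Char) :
    ((PySem.Chars.lstrip (pvL0 nt)).isEmpty ||
      !((PySem.List.pyGet? (PySem.Chars.lstrip (pvL0 nt)) 0).elim false PySem.Chars.islower)) =
    !((PySem.Chars.lstrip (pvL0 nt)).head?.elim false PySem.Chars.islower) := by
  rw [pyGet_zero_eq_head?]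
  rcases h : PySem.Chars.lstrip (pvL0 nt) with _ | ⟨a, l⟩ <;> simp

theorem if_ne_nil_append (r : List (Int × Int)) (n : Int) (l : List (Int × Int)) :
    (if l ≠ [] then r ++ pvShift n l else r) = r ++ pvShift n l := by
  rcases l with _ | _ <;> simp [pvShift]

theorem aGo_eq_bStep (rest : List (Int × String × (List (Int × Int)) × (List (Int × Int)))) :
    ∀ (o : Int) (t : List Char) (r p : List (Int × Int)),
    aGo o t r p rest = bStep (o, String.ofList t, r, p) (rest.foldr bStep []) := by
  induction rest with
  | nil => intro o t r p; rfl
  | cons nb rest' ih =>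
    obtain ⟨noff, ntext, nruns, npara⟩ := nb
    intro o t r p
    by_cases hL : pvLeftOK t = true
    · by_cases hR : (PySem.Chars.lstrip (pvL0 ntext.toList)).head?.elim false PySem.Chars.islower = true
      · -- guard holds: A merges in place, B merges via bStep_bStep
        have hg : bGuard t ntext.toList = true := by rw [bGuard_eq, hL, hR]; rfl
        have hstep : aGo o t r p ((noff, ntext, nruns, npara) :: rest') =
            aGo o (pvR0 t ++ ntext.toList) (r ++ pvShift ((pvR0 t).length : Int) nruns)
              (p ++ pvShift ((pvR0 t).length : Int) npara) rest' := by
          simp only [aGo, aCond1_eq, aCond2_eq, hL, Bool.not_true, Bool.false_eq_true, if_false,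
            hR, if_ne_nil_append]
        rw [hstep, ih]
        have hmerge : ((o : Int), String.ofList (pvR0 t ++ ntext.toList),
            r ++ pvShift ((pvR0 t).length : Int) nruns,
            p ++ pvShift ((pvR0 t).length : Int) npara) =
            bMerge (o, String.ofList t, r, p) (noff, ntext, nruns, npara) := by
          simp [bMerge]
        rw [hmerge, ← bStep_bStep _ _ _ (by simpa using hg)]
        rfl
      · -- guard's right half fails: A emits; B cannot absorb the head chunk
        have hstep : aGo o t r p ((noff, ntext, nruns, npara) :: rest') =
            (o, String.ofList t, r, p) :: aGo noff ntext.toList nruns npara rest' := by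
          simp only [aGo, aCond1_eq, aCond2_eq, hL, Bool.not_true, Bool.false_eq_true, if_false]
          rw [if_pos (by simp [hR])]
        rw [hstep, ih, String.ofList_toList]
        obtain ⟨h, tl, heq, hcf⟩ := bStep_head (rest'.foldr bStep []) (noff, ntext, nruns, npara)
        rw [List.foldr_cons, heq]
        have hgf : bGuard (String.ofList t).toList h.2.1.toList = false := by
          rw [bGuard_eq]
          unfold pvCF at hcf
          simp only [hcf]
          simp [hR]
        simp only [bStep, hgf, Bool.false_eq_true, if_false]
    · -- guard's left half fails: A emits; B cannot absorb anything
      have hstep : aGo o t r p ((noff, ntext, nruns, npara) :: rest') =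
          (o, String.ofList t, r, p) :: aGo noff ntext.toList nruns npara rest' := by
        simp only [aGo]
        rw [if_pos (by rw [aCond1_eq]; simp [hL])]
      rw [hstep, ih, String.ofList_toList]
      obtain ⟨h, tl, heq, hcf⟩ := bStep_head (rest'.foldr bStep []) (noff, ntext, nruns, npara)
      rw [List.foldr_cons, heq]
      have hgf : bGuard (String.ofList t).toList h.2.1.toList = false := by
        rw [bGuard_eq]
        simp only [String.toList_ofList]
        simp [hL]
      simp only [bStep, hgf, Bool.false_eq_true, if_false]

theorem join_eq (blocks : List (Int × String × (List (Int × Int)) × (List (Int × Int)))) :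
    join_linked_frames_py blocks = join_linked_frames_py_alt blocks := by
  unfold join_linked_frames_py join_linked_frames_py_alt
  rcases blocks with _ | ⟨⟨o, t, r, p⟩, _ | ⟨b2, rest⟩⟩
  · rfl
  · rfl
  · rw [if_neg (by simp)]
    simp only []
    rw [aGo_eq_bStep, String.ofList_toList]
    rfl

-- ===== VERDICT (by name: the statement is the Claim_ definition above) =====
theorem join_linked_frames_py_spec : Claim_equal_join_linked_frames_py := by
  unfold Claim_equal_join_linked_frames_py
  intro blocks _
  unfold Spec_join_linked_frames_py
  exact join_eq blocks
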